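-- pv_equiv track=rewrite | github.com/rsirefelt/advent_of_code | 2020/dec7/mans_larsson/day7.py | recursive_bag_count
-- ===== SOURCE A (Python) =====
-- def recursive_bag_count(keys, bags, evaluated_bags):
--     count = 0
--     for key in keys:
--         if key in evaluated_bags:
--             continue
--         count += 1
--         if key in bags:
--             c, evaluated_bags = recursive_bag_count(bags[key], bags, evaluated_bags)
--             count += c
--         evaluated_bags.add(key)
--     return count, evaluated_bags
-- ===== SOURCE B (Python) =====
-- def recursive_bag_count(keys, bags, evaluated_bags):
--     initial = len(evaluated_bags)
--     stack = [(key, False) for key in keys]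
--     stack.reverse()
--     while stack:
--         key, expanded = stack.pop()
--         if expanded:
--             evaluated_bags.add(key)
--         elif key not in evaluated_bags:
--             stack.append((key, True))
--             if key in bags:
--                 stack.extend((child, False) for child in list(bags[key])[::-1])
--     return len(evaluated_bags) - initial, evaluated_bags
-- ===== Notes on version B (the rewrite author's own statement) =====
-- stated objective: alternative
-- what changed: Replaces A's recursion (a recursive call per contained-bag list, threading a (count, set) pair through nested returns) with a single iterative DFS loop over an explicit stack of (key, expanded) markers, deriving the count from the growth of the evaluated set instead of accumulating it.
import Mathlib
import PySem

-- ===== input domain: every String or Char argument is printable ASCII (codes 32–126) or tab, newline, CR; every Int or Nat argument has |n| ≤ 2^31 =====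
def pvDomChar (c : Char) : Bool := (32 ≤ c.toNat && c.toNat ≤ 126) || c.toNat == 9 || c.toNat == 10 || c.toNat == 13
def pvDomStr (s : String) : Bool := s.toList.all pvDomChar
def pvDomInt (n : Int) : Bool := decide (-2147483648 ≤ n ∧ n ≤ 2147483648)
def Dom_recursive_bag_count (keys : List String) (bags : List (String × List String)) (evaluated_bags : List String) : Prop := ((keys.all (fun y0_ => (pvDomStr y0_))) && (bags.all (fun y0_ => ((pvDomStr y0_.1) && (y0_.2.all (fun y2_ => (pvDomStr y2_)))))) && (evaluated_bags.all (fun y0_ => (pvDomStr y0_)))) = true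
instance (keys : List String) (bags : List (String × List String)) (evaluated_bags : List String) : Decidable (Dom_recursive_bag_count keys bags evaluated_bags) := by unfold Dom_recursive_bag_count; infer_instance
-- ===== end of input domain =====

-- B replaces A's recursion with an iterative explicit-stack DFS and derives the count from the growth
-- of the evaluated set (objective: alternative; same post-order insertion behaviour, no call-stack recursion).
-- Both Pythons mutate the evaluated_bags set in place and return it; the equivalence proved here is about the
-- returned value (B mutates and returns the same set object, like A).

-- ===== PORT A =====
-- A recurses through the containment graph; on a cyclic graph the Python recursion never terminates
-- (RecursionError), so the Lean port carries a fuel counter for the recursion DEPTH only (none = fuel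
-- exhausted); under Pre_ (acyclic graph) depth ≤ bags.length + 1, so the fuel is never exhausted.
def pyRBC_A (bags : List (String × List String)) : Nat → List String → List String → Option (Int × List String)
  | _, [], ev => some (0, ev)
  | fuel, key :: rest, ev =>
    if PySem.Set.contains ev key then
      pyRBC_A bags fuel rest ev
    else
      match PySem.Dict.get? (PySem.Dict.mk bags) key with
      | some children =>
        match fuel with
        | 0 => none
        | f + 1 =>
          match pyRBC_A bags f children ev with
          | none => none
          | some (c, ev1) =>
            match pyRBC_A bags (f + 1) rest (PySem.Set.add ev1 key) with
            | none => none
            | some (c2, ev2) => some (1 + c + c2, ev2)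
      | none =>
        match pyRBC_A bags fuel rest (PySem.Set.add ev key) with
        | none => none
        | some (c2, ev2) => some (1 + c2, ev2)
  termination_by fuel keys => (fuel, keys.length)

def recursive_bag_count (keys : List String) (bags : List (String × List String)) (evaluated_bags : List String) : Int × List String :=
  (pyRBC_A bags (bags.length + 1) keys evaluated_bags).getD (0, evaluated_bags)

-- ===== PORT B =====
-- worst-case children-list length, used only to size B's totality fuel
def pvMaxChild (bags : List (String × List String)) : Nat :=
  bags.foldl (fun m p => max m p.2.length) 0

-- per-key iteration budget of the stack loop at recursion depth f (fuel bookkeeping only)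
def pvCost (w : Nat) : Nat → Nat
  | 0 => 2
  | f + 1 => 2 + w * pvCost w f

-- the 'while stack:' loop of B; the stack's top is the list head (Python's stack[-1]); fuel counts
-- loop iterations (none = fuel exhausted, never reached under Pre_)
def pyRBC_B_loop (bags : List (String × List String)) : Nat → List (String × Bool) → List String → Option (List String)
  | _, [], ev => some ev
  | 0, _ :: _, _ => none
  | g + 1, (key, expanded) :: stack, ev =>
    if expanded then
      pyRBC_B_loop bags g stack (PySem.Set.add ev key)
    else if PySem.Set.contains ev key then
      pyRBC_B_loop bags g stack ev
    else
      match PySem.Dict.get? (PySem.Dict.mk bags) key with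
      | some children => pyRBC_B_loop bags g (children.map (fun c => (c, false)) ++ (key, true) :: stack) ev
      | none => pyRBC_B_loop bags g ((key, true) :: stack) ev

def recursive_bag_count_alt (keys : List String) (bags : List (String × List String)) (evaluated_bags : List String) : Int × List String :=
  let initial := evaluated_bags.length
  match pyRBC_B_loop bags (keys.length * pvCost (pvMaxChild bags) (bags.length + 1)) (keys.map (fun k => (k, false))) evaluated_bags with
  | some ev' => ((ev'.length : Int) - (initial : Int), ev')
  | none => (0, evaluated_bags)

-- ===== PRECONDITION & SPEC =====
-- first-match children list of a key (Python's bags[key], [] when absent)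
def pvChildren (bags : List (String × List String)) (k : String) : List String :=
  (PySem.Dict.get? (PySem.Dict.mk bags) k).getD []

-- one reachability step that cannot pass through an already-evaluated bag: a frontier together with
-- everything directly contained in its not-yet-evaluated members
def pvStep (bags : List (String × List String)) (ev0 : List String) (s : List String) : List String :=
  PySem.List.dedup (s ++ (s.filter (fun x => !(PySem.Set.contains ev0 x))).flatMap (pvChildren bags))

-- bags reachable from s in at most n steps that never pass through an already-evaluated bag
def pvReach (bags : List (String × List String)) (ev0 : List String) (n : Nat) (s : List String) : List String :=
  (pvStep bags ev0)^[n] s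

-- Pre_: no containment cycle is reachable from keys through bags outside evaluated_bags — exactly the
-- inputs on which the Python A's recursion terminates (on the others it recurses forever: RecursionError).
-- The horizons are exact: a shortest reaching path / cycle repeats no dict key, so 2*|bags|+2 resp. |bags| steps suffice.
def Pre_recursive_bag_count (keys : List String) (bags : List (String × List String)) (evaluated_bags : List String) : Prop :=
  ∀ k ∈ pvReach bags evaluated_bags (2 * bags.length + 2) keys,
    (PySem.Dict.mk bags).contains k = true → k ∉ evaluated_bags →
      k ∉ pvReach bags evaluated_bags bags.length (pvChildren bags k)
instance (keys : List String) (bags : List (String × List String)) (evaluated_bags : List String) : Decidable (Pre_recursive_bag_count keys bags evaluated_bags) := by unfold Pre_recursive_bag_count; infer_instance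

def pvWitness_recursive_bag_count : List String × (List (String × List String)) × List String :=
  (["shiny gold", "dull red"], [("shiny gold", ["dull red", "pale cyan"]), ("dull red", [])], ["old bag"])

def Spec_recursive_bag_count (keys : List String) (bags : List (String × List String)) (evaluated_bags : List String) (out : Int × List String) : Prop := out = recursive_bag_count_alt keys bags evaluated_bags
instance (keys : List String) (bags : List (String × List String)) (evaluated_bags : List String) (out : Int × List String) : Decidable (Spec_recursive_bag_count keys bags evaluated_bags out) := by unfold Spec_recursive_bag_count; infer_instance

-- ===== CLAIM (what is proved, stated in full; the proofs are below) =====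
def Claim_equal_recursive_bag_count : Prop := ∀ (keys : List String) (bags : List (String × List String)) (evaluated_bags : List String), Dom_recursive_bag_count keys bags evaluated_bags → Pre_recursive_bag_count keys bags evaluated_bags → Spec_recursive_bag_count keys bags evaluated_bags (recursive_bag_count keys bags evaluated_bags)

-- ===== LEMMAS AND PROOFS =====
-- ===== LEMMAS AND PROOFS =====

lemma pv_mem_step (bags : List (String × List String)) (ev0 s : List String) (x : String) :
    x ∈ pvStep bags ev0 s ↔ x ∈ s ∨ ∃ y, y ∈ s ∧ y ∉ ev0 ∧ x ∈ pvChildren bags y := by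
  simp [pvStep, List.mem_filter, PySem.Set.contains]
  tauto

lemma pv_step_mono (bags : List (String × List String)) (ev0 : List String) {s t : List String}
    (h : ∀ x ∈ s, x ∈ t) : ∀ x ∈ pvStep bags ev0 s, x ∈ pvStep bags ev0 t := by
  intro x hx
  rw [pv_mem_step] at hx ⊢
  rcases hx with hx | ⟨y, hy, hy0, hxy⟩
  · exact Or.inl (h x hx)
  · exact Or.inr ⟨y, h y hy, hy0, hxy⟩

lemma pv_reach_mono (bags : List (String × List String)) (ev0 : List String) (n : Nat)
    {s t : List String} (h : ∀ x ∈ s, x ∈ t) :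
    ∀ x ∈ pvReach bags ev0 n s, x ∈ pvReach bags ev0 n t := by
  induction n generalizing s t with
  | zero => simpa [pvReach] using h
  | succ n ih =>
    intro x hx
    rw [pvReach, Function.iterate_succ_apply] at hx ⊢
    exact ih (pv_step_mono bags ev0 h) x hx

lemma pv_subset_reach (bags : List (String × List String)) (ev0 : List String) (n : Nat)
    (s : List String) : ∀ x ∈ s, x ∈ pvReach bags ev0 n s := by
  induction n generalizing s with
  | zero => simp [pvReach]
  | succ n ih =>
    intro x hx
    rw [pvReach, Function.iterate_succ_apply]
    exact ih _ x ((pv_mem_step bags ev0 s x).mpr (Or.inl hx))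

lemma pv_reach_succ (bags : List (String × List String)) (ev0 : List String) (n : Nat)
    (s : List String) : pvReach bags ev0 (n + 1) s = pvReach bags ev0 n (pvStep bags ev0 s) := by
  rw [pvReach, Function.iterate_succ_apply]; rfl

lemma pv_reach_le (bags : List (String × List String)) (ev0 : List String) {m n : Nat} (h : m ≤ n)
    (s : List String) : ∀ x ∈ pvReach bags ev0 m s, x ∈ pvReach bags ev0 n s := by
  induction n with
  | zero => simpa [Nat.le_zero.mp h] using fun x hx => hx
  | succ n ih =>
    rcases Nat.lt_or_ge m (n + 1) with hm | hm
    · intro x hx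
      rw [pv_reach_succ]
      have := ih (by omega) x hx
      exact pv_reach_mono bags ev0 n (fun y hy => (pv_mem_step bags ev0 s y).mpr (Or.inl hy)) x
        (by simpa [pvReach] using this)
    · have : m = n + 1 := le_antisymm h hm
      subst this; exact fun x hx => hx

lemma pv_children_reach (bags : List (String × List String)) (ev0 : List String) (n : Nat)
    {k : String} (hk0 : k ∉ ev0) :
    ∀ x ∈ pvReach bags ev0 n (pvChildren bags k), x ∈ pvReach bags ev0 (n + 1) [k] := by
  intro x hx
  rw [pv_reach_succ]
  refine pv_reach_mono bags ev0 n (fun y hy => ?_) x hx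
  exact (pv_mem_step bags ev0 [k] y).mpr (Or.inr ⟨k, by simp, hk0, hy⟩)

-- the reachable set is closed under one more containment step out of a not-yet-evaluated member
lemma pv_reach_step_mem (bags : List (String × List String)) (ev0 : List String) :
    ∀ n s {k : String}, k ∈ pvReach bags ev0 n s → k ∉ ev0 →
      ∀ c ∈ pvChildren bags k, c ∈ pvReach bags ev0 (n + 1) s := by
  intro n
  induction n with
  | zero =>
    intro s k hk hk0 c hc
    rw [pv_reach_succ]
    refine pv_subset_reach bags ev0 0 _ c ?_
    exact (pv_mem_step bags ev0 s c).mpr (Or.inr ⟨k, by simpa [pvReach] using hk, hk0, hc⟩)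
  | succ n ih =>
    intro s k hk hk0 c hc
    rw [pv_reach_succ] at hk
    rw [pv_reach_succ (n := n + 1)]
    exact ih _ hk hk0 c hc

-- number of distinct dict keys reachable from k within n blocked steps
def pvMu (bags : List (String × List String)) (ev0 : List String) (n : Nat) (k : String) : Nat :=
  (((pvReach bags ev0 n [k]).filter (fun x => (PySem.Dict.mk bags).contains x)).toFinset).card

lemma pv_mu_le (bags : List (String × List String)) (ev0 : List String) (n : Nat) (k : String) :
    pvMu bags ev0 n k ≤ bags.length := by
  unfold pvMu
  have hsub : (((pvReach bags ev0 n [k]).filter (fun x => (PySem.Dict.mk bags).contains x)).toFinset) ⊆ (bags.map Prod.fst).toFinset := by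
    intro x hx
    simp only [List.mem_toFinset, List.mem_filter] at hx ⊢
    have hc := hx.2
    rw [PySem.Dict.contains_eq_isSome_get?] at hc
    cases hg : PySem.Dict.get? (PySem.Dict.mk bags) x with
    | none => rw [hg] at hc; simp at hc
    | some cs =>
      have := PySem.Dict.mem_items_of_get?_eq_some (PySem.Dict.mk bags) hg
      exact List.mem_map.mpr ⟨(x, cs), this, rfl⟩
  calc (((pvReach bags ev0 n [k]).filter (fun x => (PySem.Dict.mk bags).contains x)).toFinset).card
      ≤ ((bags.map Prod.fst).toFinset).card := Finset.card_le_card hsub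
    _ ≤ (bags.map Prod.fst).length := List.toFinset_card_le _
    _ = bags.length := List.length_map ..

lemma pv_mu_pos (bags : List (String × List String)) (ev0 : List String) (n : Nat) (k : String)
    (h : (PySem.Dict.mk bags).contains k = true) : 1 ≤ pvMu bags ev0 n k := by
  have hk : k ∈ pvReach bags ev0 n [k] := pv_subset_reach bags ev0 n [k] k (by simp)
  have : k ∈ ((pvReach bags ev0 n [k]).filter (fun x => (PySem.Dict.mk bags).contains x)).toFinset := by
    simp only [List.mem_toFinset, List.mem_filter]
    exact ⟨hk, h⟩
  exact Finset.card_pos.mpr ⟨k, this⟩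

lemma pv_mu_step (bags : List (String × List String)) (ev0 : List String) {k : String}
    {cs : List String} (hk : PySem.Dict.get? (PySem.Dict.mk bags) k = some cs) (hk0 : k ∉ ev0)
    (hnr : k ∉ pvReach bags ev0 bags.length (pvChildren bags k)) {c : String} (hc : c ∈ cs)
    {n : Nat} (hn : n ≤ bags.length) : pvMu bags ev0 n c + 1 ≤ pvMu bags ev0 (n + 1) k := by
  have hch : pvChildren bags k = cs := by simp [pvChildren, hk]
  have hknot : k ∉ pvReach bags ev0 n [c] := by
    intro hkin
    apply hnr
    rw [hch]
    have h1 : ∀ x ∈ pvReach bags ev0 n [c], x ∈ pvReach bags ev0 n cs :=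
      pv_reach_mono bags ev0 n (by intro x hx; simp at hx; subst hx; exact hc)
    exact pv_reach_le bags ev0 hn cs k (h1 k hkin)
  have hsub : (((pvReach bags ev0 n [c]).filter (fun x => (PySem.Dict.mk bags).contains x)).toFinset) ⊆
      (((pvReach bags ev0 (n + 1) [k]).filter (fun x => (PySem.Dict.mk bags).contains x)).toFinset) := by
    intro x hx
    simp only [List.mem_toFinset, List.mem_filter] at hx ⊢
    refine ⟨?_, hx.2⟩
    have h1 : ∀ y ∈ pvReach bags ev0 n [c], y ∈ pvReach bags ev0 n (pvChildren bags k) := by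
      refine pv_reach_mono bags ev0 n ?_
      intro y hy; simp at hy; subst hy; rw [hch]; exact hc
    exact pv_children_reach bags ev0 n hk0 x (h1 x hx.1)
  have hkin : k ∈ (((pvReach bags ev0 (n + 1) [k]).filter (fun x => (PySem.Dict.mk bags).contains x)).toFinset) := by
    simp only [List.mem_toFinset, List.mem_filter]
    refine ⟨pv_subset_reach bags ev0 (n + 1) [k] k (by simp), ?_⟩
    rw [PySem.Dict.contains_eq_isSome_get?, hk]; rfl
  have hknotl : k ∉ (((pvReach bags ev0 n [c]).filter (fun x => (PySem.Dict.mk bags).contains x)).toFinset) := by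
    simp only [List.mem_toFinset, List.mem_filter]
    intro hx; exact hknot hx.1
  have : (((pvReach bags ev0 n [c]).filter (fun x => (PySem.Dict.mk bags).contains x)).toFinset) ⊂
      (((pvReach bags ev0 (n + 1) [k]).filter (fun x => (PySem.Dict.mk bags).contains x)).toFinset) :=
    ⟨hsub, fun hts => hknotl (hts hkin)⟩
  have := Finset.card_lt_card this
  unfold pvMu
  omega

lemma pv_not_mem {s : List String} {x : String} (h : ¬ PySem.Set.contains s x = true) : x ∉ s := by
  simpa [PySem.Set.contains] using h

lemma pv_add_len {s : List String} {x : String} (h : x ∉ s) :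
    (PySem.Set.add s x).length = s.length + 1 := by
  simp [PySem.Set.add, PySem.Set.contains, h]

-- A's evaluated set only grows
lemma pv_A_mono (bags : List (String × List String)) :
    ∀ f keys ev c ev', pyRBC_A bags f keys ev = some (c, ev') → ∀ x ∈ ev, x ∈ ev' := by
  intro f
  induction f using Nat.strong_induction_on with
  | _ f ihf =>
    intro keys
    induction keys with
    | nil =>
      intro ev c ev' h x hx
      rw [pyRBC_A] at h
      simp only [Option.some.injEq, Prod.mk.injEq] at h
      exact h.2 ▸ hx
    | cons key rest ihk =>
      intro ev c ev' h x hx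
      rw [pyRBC_A] at h
      split_ifs at h with hcont
      · exact ihk ev c ev' h x hx
      · cases hg : PySem.Dict.get? (PySem.Dict.mk bags) key <;> simp only [hg] at h
        · cases hA : pyRBC_A bags f rest (PySem.Set.add ev key) with
          | none => simp [hA] at h
          | some p =>
            obtain ⟨c2, ev2⟩ := p
            simp only [hA, Option.some.injEq, Prod.mk.injEq] at h
            exact h.2 ▸ ihk _ _ _ hA x ((PySem.Set.mem_add ev key x).mpr (Or.inl hx))
        · rename_i children
          cases f with
          | zero => exact absurd h (by simp)
          | succ g =>
            simp only [Nat.succ_eq_add_one] at h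
            cases hA1 : pyRBC_A bags g children ev with
            | none => simp [hA1] at h
            | some p1 =>
              obtain ⟨c1, ev1⟩ := p1
              simp only [hA1] at h
              cases hA2 : pyRBC_A bags (g + 1) rest (PySem.Set.add ev1 key) with
              | none => simp [hA2] at h
              | some p2 =>
                obtain ⟨c2, ev2⟩ := p2
                simp only [hA2, Option.some.injEq, Prod.mk.injEq] at h
                have hx1 : x ∈ ev1 := ihf g (by omega) children ev c1 ev1 hA1 x hx
                exact h.2 ▸ ihk _ _ _ hA2 x ((PySem.Set.mem_add ev1 key x).mpr (Or.inl hx1))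

-- everything in A's output set was already evaluated or is reachable (avoiding ev0) from the keys
lemma pv_A_grow (bags : List (String × List String)) (ev0 : List String) :
    ∀ f keys ev, (∀ y ∈ ev0, y ∈ ev) → ∀ c ev', pyRBC_A bags f keys ev = some (c, ev') →
      ∀ x ∈ ev', x ∈ ev ∨ x ∈ pvReach bags ev0 f keys := by
  intro f
  induction f using Nat.strong_induction_on with
  | _ f ihf =>
    intro keys
    induction keys with
    | nil =>
      intro ev _ c ev' h x hx
      rw [pyRBC_A] at h
      simp only [Option.some.injEq, Prod.mk.injEq] at h
      exact Or.inl (h.2 ▸ hx)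
    | cons key rest ihk =>
      intro ev hsub c ev' h x hx
      have hkeyr : key ∈ pvReach bags ev0 f (key :: rest) :=
        pv_subset_reach bags ev0 f _ key (List.mem_cons_self ..)
      have hrest : ∀ y ∈ pvReach bags ev0 f rest, y ∈ pvReach bags ev0 f (key :: rest) :=
        pv_reach_mono bags ev0 f (fun y hy => List.mem_cons_of_mem _ hy)
      rw [pyRBC_A] at h
      split_ifs at h with hcont
      · rcases ihk ev hsub c ev' h x hx with hx' | hr
        · exact Or.inl hx'
        · exact Or.inr (hrest x hr)
      · have hkey : key ∉ ev := pv_not_mem hcont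
        have hsub' : ∀ y ∈ ev0, y ∈ PySem.Set.add ev key :=
          fun y hy => (PySem.Set.mem_add ev key y).mpr (Or.inl (hsub y hy))
        cases hg : PySem.Dict.get? (PySem.Dict.mk bags) key <;> simp only [hg] at h
        · cases hA : pyRBC_A bags f rest (PySem.Set.add ev key) with
          | none => simp [hA] at h
          | some p =>
            obtain ⟨c2, ev2⟩ := p
            simp only [hA, Option.some.injEq, Prod.mk.injEq] at h
            rcases ihk _ hsub' _ _ hA x (h.2 ▸ hx) with hx' | hr
            · rcases (PySem.Set.mem_add ev key x).mp hx' with hx'' | rfl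
              · exact Or.inl hx''
              · exact Or.inr hkeyr
            · exact Or.inr (hrest x hr)
        · rename_i children
          cases f with
          | zero => exact absurd h (by simp)
          | succ g =>
            simp only [Nat.succ_eq_add_one] at h
            cases hA1 : pyRBC_A bags g children ev with
            | none => simp [hA1] at h
            | some p1 =>
              obtain ⟨c1, ev1⟩ := p1
              simp only [hA1] at h
              cases hA2 : pyRBC_A bags (g + 1) rest (PySem.Set.add ev1 key) with
              | none => simp [hA2] at h
              | some p2 =>
                obtain ⟨c2, ev2⟩ := p2
                simp only [hA2, Option.some.injEq, Prod.mk.injEq] at h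
                have hkey0 : key ∉ ev0 := fun hk0 => hkey (hsub key hk0)
                have hchild : ∀ y ∈ pvReach bags ev0 g children, y ∈ pvReach bags ev0 (g + 1) (key :: rest) := by
                  intro y hy
                  have hch : pvChildren bags key = children := by simp [pvChildren, hg]
                  have := pv_children_reach bags ev0 g hkey0 y (hch ▸ hy)
                  exact pv_reach_mono bags ev0 (g + 1) (by intro z hz; simp at hz; simp [hz]) y this
                have hsub1 : ∀ y ∈ ev0, y ∈ ev1 :=
                  fun y hy => pv_A_mono bags g children ev c1 ev1 hA1 y (hsub y hy)
                have hsub1' : ∀ y ∈ ev0, y ∈ PySem.Set.add ev1 key :=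
                  fun y hy => (PySem.Set.mem_add ev1 key y).mpr (Or.inl (hsub1 y hy))
                rcases ihk _ hsub1' _ _ hA2 x (h.2 ▸ hx) with hx' | hr
                · rcases (PySem.Set.mem_add ev1 key x).mp hx' with hx'' | rfl
                  · rcases ihf g (by omega) children ev hsub _ _ hA1 x hx'' with hx3 | hr3
                    · exact Or.inl hx3
                    · exact Or.inr (hchild x hr3)
                  · exact Or.inr hkeyr
                · exact Or.inr (hrest x hr)

lemma pv_not_mem_of_sub {ev0 ev : List String} {x : String} (hsub : ∀ y ∈ ev0, y ∈ ev)
    (h : x ∉ ev) : x ∉ ev0 := fun hx => h (hsub x hx)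

-- A's fuel (bags.length + 1) is never exhausted when no reachable cycle exists
lemma pv_A_suff (bags : List (String × List String)) (keys0 ev0 : List String)
    (pre : Pre_recursive_bag_count keys0 bags ev0) :
    ∀ f, f ≤ bags.length + 1 → ∀ keys,
      (∀ k ∈ keys, k ∉ ev0 → k ∈ pvReach bags ev0 (2 * bags.length + 2 - f) keys0) →
      (∀ k ∈ keys, k ∉ ev0 → (PySem.Dict.mk bags).contains k = true → pvMu bags ev0 (f - 1) k ≤ f - 1) →
      ∀ ev, (∀ y ∈ ev0, y ∈ ev) → (pyRBC_A bags f keys ev).isSome := by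
  intro f
  induction f using Nat.strong_induction_on with
  | _ f ihf =>
    intro hf keys
    induction keys with
    | nil => intro _ _ ev _; rw [pyRBC_A]; rfl
    | cons key rest ihk =>
      intro hkR hks ev hsub
      rw [pyRBC_A]
      split_ifs with hcont
      · exact ihk (fun k hk => hkR k (List.mem_cons_of_mem _ hk))
          (fun k hk => hks k (List.mem_cons_of_mem _ hk)) ev hsub
      · have hkey : key ∉ ev := pv_not_mem hcont
        have hkey0 : key ∉ ev0 := pv_not_mem_of_sub hsub hkey
        have hsub' : ∀ y ∈ ev0, y ∈ PySem.Set.add ev key :=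
          fun y hy => (PySem.Set.mem_add ev key y).mpr (Or.inl (hsub y hy))
        cases hg : PySem.Dict.get? (PySem.Dict.mk bags) key with
        | none =>
          simp only
          obtain ⟨⟨c2, ev2⟩, hA⟩ := Option.isSome_iff_exists.mp
            (ihk (fun k hk => hkR k (List.mem_cons_of_mem _ hk))
              (fun k hk => hks k (List.mem_cons_of_mem _ hk)) (PySem.Set.add ev key) hsub')
          simp [hA]
        | some children =>
          have hcontk : (PySem.Dict.mk bags).contains key = true := by
            rw [PySem.Dict.contains_eq_isSome_get?, hg]; rfl
          have hmu : pvMu bags ev0 (f - 1) key ≤ f - 1 :=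
            hks key (List.mem_cons_self ..) hkey0 hcontk
          have hpos : 1 ≤ pvMu bags ev0 (f - 1) key := pv_mu_pos bags ev0 (f - 1) key hcontk
          have hkeyR : key ∈ pvReach bags ev0 (2 * bags.length + 2 - f) keys0 :=
            hkR key (List.mem_cons_self ..) hkey0
          have hpreK : key ∉ pvReach bags ev0 bags.length (pvChildren bags key) :=
            pre key (pv_reach_le bags ev0 (by omega) keys0 key hkeyR) hcontk hkey0
          cases f with
          | zero => omega
          | succ g =>
            simp only [Nat.succ_eq_add_one, Nat.add_sub_cancel] at hmu hpos
            have hg1 : 1 ≤ g := by omega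
            have hch : pvChildren bags key = children := by simp [pvChildren, hg]
            have hchR : ∀ c ∈ children, c ∉ ev0 →
                c ∈ pvReach bags ev0 (2 * bags.length + 2 - g) keys0 := by
              intro c hc _
              have := pv_reach_step_mem bags ev0 _ keys0 hkeyR hkey0 c (hch ▸ hc)
              have heq : 2 * bags.length + 2 - (g + 1) + 1 = 2 * bags.length + 2 - g := by omega
              rwa [heq] at this
            have hchmu : ∀ c ∈ children, c ∉ ev0 → (PySem.Dict.mk bags).contains c = true →
                pvMu bags ev0 (g - 1) c ≤ g - 1 := by
              intro c hc _ _
              have hstep := pv_mu_step bags ev0 hg hkey0 hpreK hc (n := g - 1) (by omega)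
              have : g - 1 + 1 = g := by omega
              rw [this] at hstep
              omega
            obtain ⟨⟨c1, ev1⟩, hA1⟩ := Option.isSome_iff_exists.mp
              (ihf g (by omega) (by omega) children hchR hchmu ev hsub)
            have hsub1' : ∀ y ∈ ev0, y ∈ PySem.Set.add ev1 key := by
              intro y hy
              exact (PySem.Set.mem_add ev1 key y).mpr
                (Or.inl (pv_A_mono bags g children ev c1 ev1 hA1 y (hsub y hy)))
            obtain ⟨⟨c2, ev2⟩, hA2⟩ := Option.isSome_iff_exists.mp
              (ihk (fun k hk => hkR k (List.mem_cons_of_mem _ hk))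
                (fun k hk => hks k (List.mem_cons_of_mem _ hk)) (PySem.Set.add ev1 key) hsub1')
            simp only [Nat.succ_eq_add_one]
            simp [hA1, hA2]

-- A's count is exactly the growth of the evaluated set
lemma pv_A_count (bags : List (String × List String)) (keys0 ev0 : List String)
    (pre : Pre_recursive_bag_count keys0 bags ev0) :
    ∀ f, f ≤ bags.length + 1 → ∀ keys,
      (∀ k ∈ keys, k ∉ ev0 → k ∈ pvReach bags ev0 (2 * bags.length + 2 - f) keys0) →
      ∀ ev, (∀ y ∈ ev0, y ∈ ev) → ∀ c ev', pyRBC_A bags f keys ev = some (c, ev') →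
        c = (ev'.length : Int) - (ev.length : Int) := by
  intro f
  induction f using Nat.strong_induction_on with
  | _ f ihf =>
    intro hf keys
    induction keys with
    | nil =>
      intro _ ev _ c ev' h
      rw [pyRBC_A] at h
      simp only [Option.some.injEq, Prod.mk.injEq] at h
      rw [← h.1, ← h.2]; ring
    | cons key rest ihk =>
      intro hkR ev hsub c ev' h
      rw [pyRBC_A] at h
      split_ifs at h with hcont
      · exact ihk (fun k hk => hkR k (List.mem_cons_of_mem _ hk)) ev hsub c ev' h
      · have hkey : key ∉ ev := pv_not_mem hcont
        have hkey0 : key ∉ ev0 := pv_not_mem_of_sub hsub hkey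
        have hsub' : ∀ y ∈ ev0, y ∈ PySem.Set.add ev key :=
          fun y hy => (PySem.Set.mem_add ev key y).mpr (Or.inl (hsub y hy))
        cases hg : PySem.Dict.get? (PySem.Dict.mk bags) key <;> simp only [hg] at h
        · cases hA : pyRBC_A bags f rest (PySem.Set.add ev key) with
          | none => simp [hA] at h
          | some p =>
            obtain ⟨c2, ev2⟩ := p
            simp only [hA, Option.some.injEq, Prod.mk.injEq] at h
            have h2 := ihk (fun k hk => hkR k (List.mem_cons_of_mem _ hk)) _ hsub' _ _ hA
            have hlen := pv_add_len hkey
            rw [← h.1, ← h.2, h2, hlen]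
            push_cast
            ring
        · rename_i children
          cases f with
          | zero => exact absurd h (by simp)
          | succ g =>
            simp only [Nat.succ_eq_add_one] at h
            cases hA1 : pyRBC_A bags g children ev with
            | none => simp [hA1] at h
            | some p1 =>
              obtain ⟨c1, ev1⟩ := p1
              simp only [hA1] at h
              cases hA2 : pyRBC_A bags (g + 1) rest (PySem.Set.add ev1 key) with
              | none => simp [hA2] at h
              | some p2 =>
                obtain ⟨c2, ev2⟩ := p2
                simp only [hA2, Option.some.injEq, Prod.mk.injEq] at h
                have hcontk : (PySem.Dict.mk bags).contains key = true := by
                  rw [PySem.Dict.contains_eq_isSome_get?, hg]; rfl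
                have hkeyR : key ∈ pvReach bags ev0 (2 * bags.length + 2 - (g + 1)) keys0 :=
                  hkR key (List.mem_cons_self ..) hkey0
                have hpreK : key ∉ pvReach bags ev0 bags.length (pvChildren bags key) :=
                  pre key (pv_reach_le bags ev0 (by omega) keys0 key hkeyR) hcontk hkey0
                have hch : pvChildren bags key = children := by simp [pvChildren, hg]
                have hchR : ∀ k ∈ children, k ∉ ev0 →
                    k ∈ pvReach bags ev0 (2 * bags.length + 2 - g) keys0 := by
                  intro k hk _
                  have := pv_reach_step_mem bags ev0 _ keys0 hkeyR hkey0 k (hch ▸ hk)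
                  have heq : 2 * bags.length + 2 - (g + 1) + 1 = 2 * bags.length + 2 - g := by omega
                  rwa [heq] at this
                have h1 := ihf g (by omega) (by omega) children hchR ev hsub c1 ev1 hA1
                have hsub1' : ∀ y ∈ ev0, y ∈ PySem.Set.add ev1 key := by
                  intro y hy
                  exact (PySem.Set.mem_add ev1 key y).mpr
                    (Or.inl (pv_A_mono bags g children ev c1 ev1 hA1 y (hsub y hy)))
                have h2 := ihk (fun k hk => hkR k (List.mem_cons_of_mem _ hk)) _ hsub1' _ _ hA2
                have hkey1 : key ∉ ev1 := by
                  intro hk1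
                  rcases pv_A_grow bags ev0 g children ev hsub c1 ev1 hA1 key hk1 with hk2 | hk2
                  · exact hkey hk2
                  · exact hpreK
                      (hch ▸ pv_reach_le bags ev0 (show g ≤ bags.length by omega) children key hk2)
                have hlen := pv_add_len hkey1
                rw [← h.1, ← h.2, h1, h2, hlen]
                push_cast
                ring

lemma pv_B_mono (bags : List (String × List String)) :
    ∀ n stack ev ev', pyRBC_B_loop bags n stack ev = some ev' →
      ∀ m, n ≤ m → pyRBC_B_loop bags m stack ev = some ev' := by
  intro n
  induction n with
  | zero =>
    intro stack ev ev' h m _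
    cases stack with
    | nil =>
      simp only [pyRBC_B_loop] at h
      cases m <;> simpa [pyRBC_B_loop] using h
    | cons hd tl => simp [pyRBC_B_loop] at h
  | succ n ih =>
    intro stack ev ev' h m hm
    cases stack with
    | nil =>
      simp only [pyRBC_B_loop] at h
      cases m <;> simpa [pyRBC_B_loop] using h
    | cons hd tl =>
      obtain ⟨m', rfl⟩ : ∃ m', m = m' + 1 := ⟨m - 1, by omega⟩
      obtain ⟨key, expanded⟩ := hd
      rw [pyRBC_B_loop] at h ⊢
      split_ifs at h ⊢ with h1 h2
      · exact ih _ _ _ h _ (by omega)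
      · exact ih _ _ _ h _ (by omega)
      · cases hg : PySem.Dict.get? (PySem.Dict.mk bags) key <;>
          simp only [hg] at h ⊢ <;> exact ih _ _ _ h _ (by omega)

lemma pv_cost_ge_two (w : Nat) (f : Nat) : 2 ≤ pvCost w f := by
  cases f <;> simp [pvCost]

lemma pv_foldl_max_init (l : List (String × List String)) (a : Nat) :
    a ≤ l.foldl (fun m p => max m p.2.length) a := by
  induction l generalizing a with
  | nil => simp
  | cons hd tl ih => exact le_trans (le_max_left a hd.2.length) (ih _)

lemma pv_foldl_max_mem (l : List (String × List String)) (a : Nat) {p : String × List String}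
    (hp : p ∈ l) : p.2.length ≤ l.foldl (fun m p => max m p.2.length) a := by
  induction l generalizing a with
  | nil => simp at hp
  | cons hd tl ih =>
    rcases List.mem_cons.mp hp with rfl | hp
    · exact le_trans (le_max_right a p.2.length) (pv_foldl_max_init tl _)
    · exact ih _ hp

lemma pv_maxChild_le (bags : List (String × List String)) {k : String} {cs : List String}
    (h : PySem.Dict.get? (PySem.Dict.mk bags) k = some cs) : cs.length ≤ pvMaxChild bags := by
  have hmem : (k, cs) ∈ bags := PySem.Dict.mem_items_of_get?_eq_some (PySem.Dict.mk bags) h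
  exact pv_foldl_max_mem bags 0 hmem

-- the stack loop of B simulates A's recursion, state for state
lemma pv_sim (bags : List (String × List String)) :
    ∀ f keys ev c ev', pyRBC_A bags f keys ev = some (c, ev') →
      ∀ n rest ev'', pyRBC_B_loop bags n rest ev' = some ev'' →
        ∀ m, n + keys.length * pvCost (pvMaxChild bags) f ≤ m →
          pyRBC_B_loop bags m (keys.map (fun k => (k, false)) ++ rest) ev = some ev'' := by
  intro f
  induction f using Nat.strong_induction_on with
  | _ f ihf =>
    intro keys
    induction keys with
    | nil =>
      intro ev c ev' h n rest ev'' hB m hm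
      rw [pyRBC_A] at h
      simp only [Option.some.injEq, Prod.mk.injEq] at h
      rw [← h.2] at hB
      simpa using pv_B_mono bags n rest ev ev'' hB m (by simpa using hm)
    | cons key rest ihk =>
      intro ev c ev' h n rest' ev'' hB m hm
      have hC2 : 2 ≤ pvCost (pvMaxChild bags) f := pv_cost_ge_two _ _
      simp only [List.length_cons, Nat.succ_mul] at hm
      rw [pyRBC_A] at h
      split_ifs at h with hcont
      · -- key already evaluated: one pop, no push
        obtain ⟨m', rfl⟩ : ∃ m', m = m' + 1 := ⟨m - 1, by omega⟩
        rw [List.map_cons, List.cons_append, pyRBC_B_loop]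
        simp only [Bool.false_eq_true, if_false, hcont, if_true]
        exact ihk ev c ev' h n rest' ev'' hB m' (by omega)
      · have hc' : PySem.Set.contains ev key = false := by simpa using hcont
        cases hg : PySem.Dict.get? (PySem.Dict.mk bags) key <;> simp only [hg] at h
        · -- key not in bags: pop, push marker, pop marker
          cases hA : pyRBC_A bags f rest (PySem.Set.add ev key) with
          | none => simp [hA] at h
          | some p =>
            obtain ⟨c2, ev2⟩ := p
            simp only [hA, Option.some.injEq, Prod.mk.injEq] at h
            obtain ⟨m', rfl⟩ : ∃ m', m = m' + 2 := ⟨m - 2, by omega⟩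
            rw [List.map_cons, List.cons_append, show m' + 2 = (m' + 1) + 1 from rfl, pyRBC_B_loop]
            simp only [Bool.false_eq_true, if_false, hc', hg]
            rw [pyRBC_B_loop]
            simp only [if_true]
            rw [← h.2] at hB
            exact ihk _ _ _ hA n rest' ev'' hB m' (by omega)
        · -- key in bags: pop, push children and marker
          rename_i children
          cases f with
          | zero => exact absurd h (by simp)
          | succ g =>
            simp only [Nat.succ_eq_add_one] at h
            cases hA1 : pyRBC_A bags g children ev with
            | none => simp [hA1] at h
            | some p1 =>
              obtain ⟨c1, ev1⟩ := p1
              simp only [hA1] at h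
              cases hA2 : pyRBC_A bags (g + 1) rest (PySem.Set.add ev1 key) with
              | none => simp [hA2] at h
              | some p2 =>
                obtain ⟨c2, ev2⟩ := p2
                simp only [hA2, Option.some.injEq, Prod.mk.injEq] at h
                rw [← h.2] at hB
                -- after popping the marker (key, true) the loop continues like A's continuation
                have hmark : pyRBC_B_loop bags (n + rest.length * pvCost (pvMaxChild bags) (g + 1) + 1)
                    ((key, true) :: (rest.map (fun k => (k, false)) ++ rest')) ev1 = some ev'' := by
                  rw [pyRBC_B_loop]
                  simp only [if_true]
                  exact ihk _ _ _ hA2 n rest' ev'' hB _ (le_refl _)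
                obtain ⟨m', rfl⟩ : ∃ m', m = m' + 1 := ⟨m - 1, by omega⟩
                rw [List.map_cons, List.cons_append, pyRBC_B_loop]
                simp only [Bool.false_eq_true, if_false, hc', hg]
                have hlen : children.length ≤ pvMaxChild bags := pv_maxChild_le bags hg
                have hmul : children.length * pvCost (pvMaxChild bags) g ≤
                    pvMaxChild bags * pvCost (pvMaxChild bags) g :=
                  Nat.mul_le_mul_right _ hlen
                have hCf : pvCost (pvMaxChild bags) (g + 1) =
                    2 + pvMaxChild bags * pvCost (pvMaxChild bags) g := rfl
                refine ihf g (by omega) children ev c1 ev1 hA1 _ _ ev'' hmark m' ?_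
                generalize hR : rest.length * pvCost (pvMaxChild bags) (g + 1) = R at hm hmark ⊢
                generalize hS : children.length * pvCost (pvMaxChild bags) g = S at hmul ⊢
                generalize hT : pvMaxChild bags * pvCost (pvMaxChild bags) g = T at hmul hCf
                omega

-- ===== VERDICT (by name: the statement is the Claim_ definition above) =====
theorem recursive_bag_count_spec : Claim_equal_recursive_bag_count := by
  unfold Claim_equal_recursive_bag_count
  intro keys bags evb _ pre
  unfold Spec_recursive_bag_count recursive_bag_count recursive_bag_count_alt
  have hkR : ∀ k ∈ keys, k ∉ evb →
      k ∈ pvReach bags evb (2 * bags.length + 2 - (bags.length + 1)) keys :=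
    fun k hk _ => pv_subset_reach bags evb _ keys k hk
  have hsuff := pv_A_suff bags keys evb pre (bags.length + 1) (le_refl _) keys hkR
    (fun k _ _ _ => pv_mu_le bags evb bags.length k) evb (fun y hy => hy)
  obtain ⟨⟨c, ev'⟩, hA⟩ := Option.isSome_iff_exists.mp hsuff
  have hc := pv_A_count bags keys evb pre (bags.length + 1) (le_refl _) keys hkR evb
    (fun y hy => hy) c ev' hA
  have hloop := pv_sim bags (bags.length + 1) keys evb c ev' hA 0 [] ev'
    (by rw [pyRBC_B_loop]) (keys.length * pvCost (pvMaxChild bags) (bags.length + 1)) (by omega)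
  rw [List.append_nil] at hloop
  rw [hA, hloop]
  simp [hc]
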